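-- pv_equiv track=rewrite | github.com/jiachen0212/hope_better_job | jianzhioffer/leetcode/MxN正长方形面积个数.py | many_cza
-- ===== SOURCE A (Python) =====
-- def many_cza(m, n):
--     c = 0
--     z = 0
--     areas = set()
--     for x in range(m):
--         for y in range(n):
--             width = m - x
--             height = n - y
--             c += width * height - min(width, height)
--             z += min(width, height)
--             areas.add(width*height)
--     return c, z, len(areas)
-- ===== SOURCE B (Python) =====
-- def many_cza(m, n):
--     if m <= 0 or n <= 0:
--         return 0, 0, 0
--     tm = m * (m + 1) // 2
--     tn = n * (n + 1) // 2
--     z = sum((m - k + 1) * (n - k + 1) for k in range(1, min(m, n) + 1))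
--     areas = {w * h for w in range(1, m + 1) for h in range(1, n + 1)}
--     return tm * tn - z, z, len(areas)
-- ===== Notes on version B (the rewrite author's own statement) =====
-- stated objective: alternative
-- what changed: c and z are no longer accumulated over the m*n grid: c comes from the closed-form product of triangular numbers minus z, z from a single O(min(m,n)) loop, and only the distinct-area set still enumerates the grid via a set comprehension.
import Mathlib
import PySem

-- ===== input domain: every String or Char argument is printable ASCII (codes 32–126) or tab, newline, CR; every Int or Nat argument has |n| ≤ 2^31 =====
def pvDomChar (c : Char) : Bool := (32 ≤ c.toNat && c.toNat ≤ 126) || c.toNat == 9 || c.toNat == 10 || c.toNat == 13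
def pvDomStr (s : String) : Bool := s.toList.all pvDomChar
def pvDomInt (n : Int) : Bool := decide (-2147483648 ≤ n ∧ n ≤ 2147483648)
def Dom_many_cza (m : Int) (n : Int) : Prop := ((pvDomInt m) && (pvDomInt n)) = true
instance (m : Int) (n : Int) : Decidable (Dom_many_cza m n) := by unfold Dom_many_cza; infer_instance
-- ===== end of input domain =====

-- B replaces A's per-cell accumulation of c and z by closed-form sums (triangular-number
-- product and an O(min(m,n)) loop); only the distinct-area set still enumerates the grid.

-- Python's 'set' is modelled by Std.HashSet in both ports (only membership and the final
-- size are observed, so this is exact; a list-backed set would be quadratic to evaluate).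

-- ===== PORT A =====
def many_cza (m : Int) (n : Int) : Int × Int × Int :=
  let st := (PySem.List.pyRange 0 m 1).foldl (fun st x =>
    (PySem.List.pyRange 0 n 1).foldl (fun st y =>
      let width := m - x
      let height := n - y
      (st.1 + (width * height - min width height),
       st.2.1 + min width height,
       st.2.2.insert (width * height))) st)
    ((0 : Int), (0 : Int), (∅ : Std.HashSet Int))
  (st.1, st.2.1, (st.2.2.size : Int))

-- ===== PORT B =====
def many_cza_alt (m : Int) (n : Int) : Int × Int × Int :=
  if m ≤ 0 ∨ n ≤ 0 then (0, 0, 0)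
  else
    let tm := PySem.Int.floordiv (m * (m + 1)) 2
    let tn := PySem.Int.floordiv (n * (n + 1)) 2
    let z := ((PySem.List.pyRange 1 (min m n + 1) 1).map
      (fun k => (m - k + 1) * (n - k + 1))).sum
    let areas := ((PySem.List.pyRange 1 (m + 1) 1).flatMap
      (fun w => (PySem.List.pyRange 1 (n + 1) 1).map (fun h => w * h))).foldl
        (fun s v => s.insert v) (∅ : Std.HashSet Int)
    (tm * tn - z, z, (areas.size : Int))

-- ===== PRECONDITION & SPEC =====
def Spec_many_cza (m : Int) (n : Int) (out : Int × Int × Int) : Prop := out = many_cza_alt m n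
instance (m : Int) (n : Int) (out : Int × Int × Int) : Decidable (Spec_many_cza m n out) := by unfold Spec_many_cza; infer_instance

-- ===== CLAIM (what is proved, stated in full; the proofs are below) =====
def Claim_equal_many_cza : Prop := ∀ (m : Int) (n : Int), Dom_many_cza m n → Spec_many_cza m n (many_cza m n)

-- ===== LEMMAS AND PROOFS =====

lemma list_sum_range (f : ℕ → ℤ) (M : ℕ) :
    ((List.range M).map f).sum = ∑ j ∈ Finset.range M, f j := by
  induction M with
  | zero => simp
  | succ k ih => rw [List.range_succ, Finset.sum_range_succ]; simp [ih]

lemma foldl_triple_add {α σ : Type} (l : List α) (f g : α → Int) (h : α → Int)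
    (addF : σ → Int → σ) (st : Int × Int × σ) :
    l.foldl (fun st x => (st.1 + f x, st.2.1 + g x, addF st.2.2 (h x))) st
      = (st.1 + (l.map f).sum, st.2.1 + (l.map g).sum,
         (l.map h).foldl addF st.2.2) := by
  induction l generalizing st with
  | nil => simp
  | cons a t ih => simp [ih]; constructor <;> ring

lemma foldl_triple_add2 {α β σ : Type} (l : List α) (f g : α → Int)
    (inner : α → List β) (h : α → β → Int) (addF : σ → Int → σ) (st : Int × Int × σ) :
    l.foldl (fun st x => (st.1 + f x, st.2.1 + g x,
        (inner x).foldl (fun s y => addF s (h x y)) st.2.2)) st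
      = (st.1 + (l.map f).sum, st.2.1 + (l.map g).sum,
         (l.flatMap (fun x => (inner x).map (h x))).foldl addF st.2.2) := by
  induction l generalizing st with
  | nil => simp
  | cons a t ih =>
      simp [ih, List.foldl_append, List.foldl_map]
      constructor <;> ring

lemma sum_ite_le (M k : ℕ) :
    (∑ j ∈ Finset.range M, if k ≤ j then (1:ℤ) else 0) = ((M - k : ℕ) : ℤ) := by
  induction M with
  | zero => simp
  | succ t ih =>
      rw [Finset.sum_range_succ, ih]
      by_cases hk : k ≤ t <;> simp [hk] <;> omega

lemma sum_ite_lt (K t : ℕ) :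
    (∑ k ∈ Finset.range K, if k ≤ t then (1:ℤ) else 0) = ((min (t+1) K : ℕ) : ℤ) := by
  induction K with
  | zero => simp
  | succ s ih =>
      rw [Finset.sum_range_succ, ih]
      by_cases hk : s ≤ t <;> simp [hk] <;> omega

lemma gauss (M : ℕ) :
    2 * (∑ j ∈ Finset.range M, ((j:ℤ) + 1)) = (M:ℤ) * (M + 1) := by
  induction M with
  | zero => simp
  | succ t ih => rw [Finset.sum_range_succ]; push_cast; push_cast at ih; ring_nf; ring_nf at ih; omega

lemma minsum (M N : ℕ) :
    (∑ j ∈ Finset.range M, ∑ i ∈ Finset.range N, min ((j:ℤ)+1) ((i:ℤ)+1))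
    = ∑ k ∈ Finset.range (min M N), ((M:ℤ) - k) * ((N:ℤ) - k) := by
  have key : ∀ j ∈ Finset.range M, ∀ i ∈ Finset.range N,
      min ((j:ℤ)+1) ((i:ℤ)+1)
        = ∑ k ∈ Finset.range (min M N),
            (if k ≤ j then (1:ℤ) else 0) * (if k ≤ i then (1:ℤ) else 0) := by
    intro j hj i hi
    simp only [Finset.mem_range] at hj hi
    have hfac : ∀ k, (if k ≤ j then (1:ℤ) else 0) * (if k ≤ i then (1:ℤ) else 0)
        = (if k ≤ min j i then (1:ℤ) else 0) := by
      intro k; by_cases h1 : k ≤ j <;> by_cases h2 : k ≤ i <;> simp [h1, h2] <;> omega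
    simp only [hfac, sum_ite_lt]
    have hmin : min (min j i + 1) (min M N) = min j i + 1 := by omega
    rw [hmin]; push_cast; omega
  rw [Finset.sum_congr rfl (fun j hj => Finset.sum_congr rfl (fun i hi => key j hj i hi))]
  have step1 : ∀ j : ℕ,
      (∑ i ∈ Finset.range N, ∑ k ∈ Finset.range (min M N),
        (if k ≤ j then (1:ℤ) else 0) * (if k ≤ i then (1:ℤ) else 0))
      = ∑ k ∈ Finset.range (min M N),
          (if k ≤ j then (1:ℤ) else 0) * ((N - k : ℕ) : ℤ) := by
    intro j
    rw [Finset.sum_comm]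
    exact Finset.sum_congr rfl (fun k _ => by rw [← Finset.mul_sum, sum_ite_le])
  simp only [step1]
  rw [Finset.sum_comm]
  refine Finset.sum_congr rfl (fun k hk => ?_)
  rw [← Finset.sum_mul, sum_ite_le]
  simp only [Finset.mem_range] at hk
  have h1 : ((M - k : ℕ) : ℤ) = (M:ℤ) - k := by omega
  have h2 : ((N - k : ℕ) : ℤ) = (N:ℤ) - k := by omega
  rw [h1, h2]

lemma reflect_int (M : ℕ) (g : ℤ → ℤ) :
    ∑ j ∈ Finset.range M, g ((M:ℤ) - j) = ∑ j ∈ Finset.range M, g ((j:ℤ) + 1) := by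
  rw [← Finset.sum_range_reflect (fun j => g ((j:ℤ)+1)) M]
  refine Finset.sum_congr rfl fun j hj => ?_
  simp only [Finset.mem_range] at hj
  congr 1
  have : ((M - 1 - j : ℕ):ℤ) = (M:ℤ) - 1 - j := by omega
  rw [this]; ring

lemma hs_foldl (l : List ℤ) (hs : Std.HashSet ℤ) (s : Finset ℤ)
    (hmem : ∀ v, v ∈ hs ↔ v ∈ s) (hsz : hs.size = s.card) :
    (∀ v, v ∈ l.foldl (fun h x => h.insert x) hs ↔ v ∈ s ∪ l.toFinset) ∧
    (l.foldl (fun h x => h.insert x) hs).size = (s ∪ l.toFinset).card := by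
  induction l generalizing hs s with
  | nil => simpa using ⟨hmem, hsz⟩
  | cons a t ih =>
      have hmem' : ∀ v, v ∈ hs.insert a ↔ v ∈ insert a s := by
        intro v
        rw [Std.HashSet.mem_insert, Finset.mem_insert, ← hmem v]
        simp only [beq_iff_eq]
        constructor <;> rintro (h | h)
        · exact Or.inl h.symm
        · exact Or.inr h
        · exact Or.inl h.symm
        · exact Or.inr h
      have hsz' : (hs.insert a).size = (insert a s).card := by
        rw [Std.HashSet.size_insert]
        by_cases ha : a ∈ s
        · rw [if_pos ((hmem a).mpr ha), Finset.insert_eq_self.mpr ha, hsz]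
        · rw [if_neg (fun h => ha ((hmem a).mp h)), Finset.card_insert_of_notMem ha, hsz]
      have hset : insert a s ∪ t.toFinset = s ∪ (a :: t).toFinset := by
        ext x; simp [List.toFinset_cons]
      have := ih (hs.insert a) (insert a s) hmem' hsz'
      simpa [hset] using this

lemma hs_size_card (l : List ℤ) :
    (l.foldl (fun h x => h.insert x) (∅ : Std.HashSet ℤ)).size = l.toFinset.card := by
  have := hs_foldl l ∅ ∅ (fun v => by simp [Std.HashSet.not_mem_empty]) Std.HashSet.size_empty
  simpa using this.2

set_option maxHeartbeats 1000000 in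
lemma min_double (M N : ℕ) :
    (∑ j ∈ Finset.range M, ∑ i ∈ Finset.range N, min ((M:ℤ) - ↑j) ((N:ℤ) - ↑i))
      = ∑ k ∈ Finset.range (min M N), ((M:ℤ) - ↑k) * ((N:ℤ) - ↑k) := by
  have h1 : (∑ j ∈ Finset.range M, ∑ i ∈ Finset.range N, min ((M:ℤ) - ↑j) ((N:ℤ) - ↑i))
      = ∑ j ∈ Finset.range M, ∑ i ∈ Finset.range N, min ((j:ℤ)+1) ((N:ℤ) - ↑i) := by
    exact reflect_int M (fun w => ∑ i ∈ Finset.range N, min w ((N:ℤ) - ↑i))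
  have h2 : (∑ j ∈ Finset.range M, ∑ i ∈ Finset.range N, min ((j:ℤ)+1) ((N:ℤ) - ↑i))
      = ∑ j ∈ Finset.range M, ∑ i ∈ Finset.range N, min ((j:ℤ)+1) ((i:ℤ)+1) := by
    exact Finset.sum_congr rfl (fun j _ => reflect_int N (fun h => min ((j:ℤ)+1) h))
  rw [h1, h2]
  exact minsum M N

theorem many_cza_eq (m n : Int) : many_cza m n = many_cza_alt m n := by
  by_cases hmn : m ≤ 0 ∨ n ≤ 0
  · have hA : many_cza m n = (0, 0, 0) := by
      unfold many_cza
      rcases hmn with hm | hn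
      · rw [PySem.List.pyRange_one_eq_nil hm]; rfl
      · rw [PySem.List.pyRange_one_eq_nil hn]
        simp [Std.HashSet.size_empty]
    rw [hA, many_cza_alt, if_pos hmn]
  · push_neg at hmn
    obtain ⟨hm, hn⟩ := hmn
    obtain ⟨M, rfl⟩ : ∃ M : ℕ, m = (M:ℤ) := ⟨m.toNat, by omega⟩
    obtain ⟨N, rfl⟩ : ∃ N : ℕ, n = (N:ℤ) := ⟨n.toNat, by omega⟩
    have hrm : PySem.List.pyRange 0 (M:ℤ) 1 = (List.range M).map (fun k => ((k:ℕ) : ℤ)) := by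
      rw [PySem.List.pyRange_one]; simp
    have hrn : PySem.List.pyRange 0 (N:ℤ) 1 = (List.range N).map (fun k => ((k:ℕ) : ℤ)) := by
      rw [PySem.List.pyRange_one]; simp
    unfold many_cza many_cza_alt
    rw [if_neg (by omega)]
    simp only [hrm, hrn, List.foldl_map, foldl_triple_add]
    rw [foldl_triple_add2]
    simp only [zero_add, Prod.mk.injEq]
    have hT : ∀ K : ℕ, PySem.Int.floordiv ((K:ℤ) * ((K:ℤ)+1)) 2 = ∑ j ∈ Finset.range K, ((j:ℤ)+1) := by
      intro K
      rw [← gauss K]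
      simp [PySem.Int.floordiv]
    have hrefl : ∀ K : ℕ, (∑ j ∈ Finset.range K, ((K:ℤ) - ↑j)) = ∑ j ∈ Finset.range K, ((j:ℤ)+1) :=
      fun K => reflect_int K (fun w => w)
    have hzB : (List.map (fun k => ((M:ℤ) - k + 1) * ((N:ℤ) - k + 1)) (PySem.List.pyRange 1 (min (M:ℤ) (N:ℤ) + 1) 1)).sum
        = ∑ k ∈ Finset.range (min M N), ((M:ℤ) - ↑k) * ((N:ℤ) - ↑k) := by
      have hmn' : min (M:ℤ) (N:ℤ) + 1 = ((min M N + 1 : ℕ) : ℤ) := by push_cast; omega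
      rw [hmn', PySem.List.pyRange_one]
      simp only [List.map_map]
      have htn : (((min M N + 1 : ℕ) : ℤ) - 1).toNat = min M N := by omega
      rw [htn, list_sum_range]
      refine Finset.sum_congr rfl fun k _ => ?_
      simp only [Function.comp]
      ring
    refine ⟨?_, ?_, ?_⟩
    · rw [hzB, list_sum_range]
      simp only [list_sum_range]
      have hsplit : ∀ j ∈ Finset.range M,
          (∑ i ∈ Finset.range N, (((M:ℤ) - ↑j) * ((N:ℤ) - ↑i) - min ((M:ℤ) - ↑j) ((N:ℤ) - ↑i)))
          = (∑ i ∈ Finset.range N, ((M:ℤ) - ↑j) * ((N:ℤ) - ↑i))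
            - ∑ i ∈ Finset.range N, min ((M:ℤ) - ↑j) ((N:ℤ) - ↑i) :=
        fun j _ => Finset.sum_sub_distrib _ _
      rw [Finset.sum_congr rfl hsplit, Finset.sum_sub_distrib _ _]
      have h1 : (∑ j ∈ Finset.range M, ∑ i ∈ Finset.range N, ((M:ℤ) - ↑j) * ((N:ℤ) - ↑i))
          = (∑ j ∈ Finset.range M, ((M:ℤ) - ↑j)) * ∑ i ∈ Finset.range N, ((N:ℤ) - ↑i) :=
        (Finset.sum_mul_sum _ _ _ _).symm
      rw [h1, min_double M N, hT M, hT N, hrefl M, hrefl N]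
    · rw [hzB, list_sum_range]
      simp only [list_sum_range]
      exact min_double M N
    · have hmem : ∀ v : ℤ,
          v ∈ List.flatMap (fun x => List.map (fun y => ((M:ℤ) - ↑x) * ((N:ℤ) - ↑y)) (List.range N)) (List.range M)
          ↔ v ∈ List.flatMap (fun w => List.map (fun h => w * h) (PySem.List.pyRange 1 ((N:ℤ) + 1) 1)) (PySem.List.pyRange 1 ((M:ℤ) + 1) 1) := by
        intro v
        simp only [List.mem_flatMap, List.mem_map, List.mem_range, PySem.List.mem_pyRange_one]
        constructor
        · rintro ⟨j, hj, i, hi, rfl⟩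
          exact ⟨(M:ℤ) - ↑j, ⟨by omega, by omega⟩, (N:ℤ) - ↑i, ⟨by omega, by omega⟩, rfl⟩
        · rintro ⟨w, hw, h, hh, rfl⟩
          refine ⟨((M:ℤ) - w).toNat, by omega, ((N:ℤ) - h).toNat, by omega, ?_⟩
          have h1 : ((((M:ℤ) - w).toNat : ℕ) : ℤ) = (M:ℤ) - w := Int.toNat_of_nonneg (by omega)
          have h2 : ((((N:ℤ) - h).toNat : ℕ) : ℤ) = (N:ℤ) - h := Int.toNat_of_nonneg (by omega)
          rw [h1, h2]
          ring
      rw [hs_size_card, hs_size_card]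
      exact congrArg (fun c : ℕ => (c : ℤ)) (congrArg Finset.card
        (Finset.ext (fun x => by simpa [List.mem_toFinset] using hmem x)))

-- ===== VERDICT (by name: the statement is the Claim_ definition above) =====
theorem many_cza_spec : Claim_equal_many_cza := by
  intro m n _
  exact many_cza_eq m n
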